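-- pv_equiv track=rewrite | github.com/tamtamhihi/Leetcode | Greedy/321. Create Maximum Number.py | getMaxK
-- ===== SOURCE A (Python) =====
-- def getMaxK(nums, k):
--     if k == 0:
--         return []
--     n = len(nums)
--     # Take the first k digits
--     a = [nums[i] for i in range(k)]
--
--     # For each next digit, we try to find if we can append
--     # this digit to a, and pop 1 exisitng digit out of a
--     # to make a larger.
--     # To do so, we find out the 1st position smaller than its
--     # right neighbor. If that exists, we will remove that
--     # position.
--     for i in range(k, n):
--         a.append(nums[i])
--         j = 0
--         while j < k:
--             if a[j] < a[j+1]: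
--                 break
--             j += 1
--         a.pop(j)
--     return a
-- ===== SOURCE B (Python) =====
-- def getMaxK(nums, k):
--     # Monotonic-stack greedy: keep a stack, pop smaller tops while we can
--     # still afford to drop digits; single O(n) pass instead of O(n*k).
--     if k <= 0:
--         return []
--     drop = len(nums) - k
--     st = []
--     for x in nums:
--         while st and drop > 0 and st[-1] < x:
--             st.pop()
--             drop -= 1
--         st.append(x)
--     return st[:k]
-- ===== Notes on version B (the rewrite author's own statement) =====
-- stated objective: faster
-- what changed: A keeps a k-element buffer and, for every further digit, rescans it for the first ascent to delete (O(n*k)); B is a one-pass monotonic-stack greedy that pops smaller stack tops while enough digits remain, O(n).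
import Mathlib
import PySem

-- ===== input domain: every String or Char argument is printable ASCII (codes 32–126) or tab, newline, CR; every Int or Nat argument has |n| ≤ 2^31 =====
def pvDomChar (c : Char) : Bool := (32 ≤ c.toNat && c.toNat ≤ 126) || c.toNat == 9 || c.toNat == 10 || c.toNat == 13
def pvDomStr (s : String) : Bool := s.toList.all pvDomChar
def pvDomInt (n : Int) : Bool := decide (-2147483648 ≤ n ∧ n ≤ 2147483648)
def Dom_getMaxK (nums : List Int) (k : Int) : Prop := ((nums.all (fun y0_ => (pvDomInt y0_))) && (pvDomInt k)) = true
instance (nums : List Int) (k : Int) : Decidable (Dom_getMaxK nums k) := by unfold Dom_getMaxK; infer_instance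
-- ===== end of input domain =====

-- B replaces A's per-digit rescan of a k-buffer by a one-pass monotonic-stack greedy (asymptotically faster).

-- ===== PORT A =====
-- A's inner `while j < k: if a[j] < a[j+1]: break; j += 1`; the fuel only makes the
-- loop total (k.toNat + 1 is an upper bound on its iterations, so it is never exhausted).
def findJGo : Nat → List Int → Int → Int → Int
  | 0, _, _, j => j
  | fuel+1, a, k, j =>
    if j < k then
      if PySem.List.pyGetD a j 0 < PySem.List.pyGetD a (j+1) 0 then j
      else findJGo fuel a k (j+1)
    else j

-- `a.pop(j)` (the resulting list; IndexError cannot happen on the indices A uses inside Pre_)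
def popAt (a : List Int) (j : Int) : List Int :=
  ((PySem.List.pop? a j).map (·.2)).getD a

def getMaxK (nums : List Int) (k : Int) : List Int :=
  if k = 0 then []
  else
    let n : Int := PySem.List.len nums
    let a0 := (PySem.List.pyRange 0 k).map (fun i => PySem.List.pyGetD nums i 0)
    (PySem.List.pyRange k n).foldl (fun a i =>
      let a' := a ++ [PySem.List.pyGetD nums i 0]
      popAt a' (findJGo (k.toNat + 1) a' k 0)) a0

-- ===== PORT B =====
-- B's inner `while st and drop > 0 and st[-1] < x: st.pop(); drop -= 1`; fuel st.length + 1
-- bounds the iterations (each pop shortens st), so it is never exhausted.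
def popLoopGo : Nat → List Int → Int → Int → List Int × Int
  | 0, st, drop, _ => (st, drop)
  | fuel+1, st, drop, x =>
    if st ≠ [] ∧ 0 < drop ∧ PySem.List.pyGetD st (-1) 0 < x then
      popLoopGo fuel (((PySem.List.pop? st (-1)).map (·.2)).getD st) (drop - 1) x
    else (st, drop)

def getMaxK_alt (nums : List Int) (k : Int) : List Int :=
  if k ≤ 0 then []
  else
    let r := nums.foldl (fun (p : List Int × Int) x =>
      let q := popLoopGo (p.1.length + 1) p.1 p.2 x
      (q.1 ++ [x], q.2)) ([], PySem.List.len nums - k)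
    PySem.List.slice r.1 none (some k)

-- ===== PRECONDITION & SPEC =====
-- Pre_ excludes exactly the inputs on which A raises IndexError: |k| > len(nums).
def Pre_getMaxK (nums : List Int) (k : Int) : Prop :=
  -(PySem.List.len nums) ≤ k ∧ k ≤ PySem.List.len nums
instance (nums : List Int) (k : Int) : Decidable (Pre_getMaxK nums k) := by
  unfold Pre_getMaxK; infer_instance
def pvWitness_getMaxK : List Int × Int := ([2, 1, 3], 2)

def Spec_getMaxK (nums : List Int) (k : Int) (out : List Int) : Prop := out = getMaxK_alt nums k
instance (nums : List Int) (k : Int) (out : List Int) : Decidable (Spec_getMaxK nums k out) := by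
  unfold Spec_getMaxK; infer_instance

-- ===== CLAIM (what is proved, stated in full; the proofs are below) =====
def Claim_equal_getMaxK : Prop := ∀ (nums : List Int) (k : Int), Dom_getMaxK nums k → Pre_getMaxK nums k → Spec_getMaxK nums k (getMaxK nums k)

-- ===== LEMMAS AND PROOFS =====

/- Both programs compute the lexicographically greatest length-k subsequence.  The shared
   yardstick is `R u`: remove the first element of `u` that is smaller than its right
   neighbour (the last element if `u` is non-increasing).  A's per-digit step is
   `a ↦ R (a ++ [x])`; B's final stack equals `R` iterated (len - k) times on nums.  The key
   theorem `lexLe_Rpow` states that `Rpow m u` dominates every sublist of `u` of its length. -/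

-- lexicographic ≤ on Int lists (all comparisons below are between lists of equal length)
def lexLe : List Int → List Int → Prop
  | [], _ => True
  | _ :: _, [] => False
  | a :: s, b :: t => a < b ∨ (a = b ∧ lexLe s t)

theorem lexLe_refl : ∀ l : List Int, lexLe l l
  | [] => trivial
  | _ :: t => Or.inr ⟨rfl, lexLe_refl t⟩

theorem lexLe_trans : ∀ {l₁ l₂ l₃ : List Int}, lexLe l₁ l₂ → lexLe l₂ l₃ → lexLe l₁ l₃
  | [], _, _, _, _ => trivial
  | _ :: _, [], _, h, _ => absurd h not_false
  | _ :: _, _ :: _, [], _, h => absurd h not_false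
  | a :: s, b :: t, c :: r, h₁, h₂ => by
    rcases h₁ with h₁ | ⟨rfl, h₁⟩ <;> rcases h₂ with h₂ | ⟨rfl, h₂⟩
    · exact Or.inl (lt_trans h₁ h₂)
    · exact Or.inl h₁
    · exact Or.inl h₂
    · exact Or.inr ⟨rfl, lexLe_trans h₁ h₂⟩

theorem lexLe_antisymm : ∀ {l₁ l₂ : List Int}, lexLe l₁ l₂ → lexLe l₂ l₁ → l₁ = l₂
  | [], [], _, _ => rfl
  | [], _ :: _, _, h => absurd h not_false
  | _ :: _, [], h, _ => absurd h not_false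
  | a :: s, b :: t, h₁, h₂ => by
    rcases h₁ with h₁ | ⟨rfl, h₁⟩ <;> rcases h₂ with h₂ | ⟨h, h₂⟩ <;>
      first
      | omega
      | exact absurd h₂ (by omega)
      | exact congrArg _ (lexLe_antisymm h₁ h₂)

theorem lexLe_cons (x : Int) {s t : List Int} (h : lexLe s t) : lexLe (x :: s) (x :: t) :=
  Or.inr ⟨rfl, h⟩

theorem lexLe_append_right : ∀ {s t : List Int}, lexLe s t → s.length = t.length →
    ∀ v : List Int, lexLe (s ++ v) (t ++ v)
  | [], [], _, _, v => lexLe_refl v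
  | [], _ :: _, _, hl, _ => by simp at hl
  | _ :: _, [], h, _, _ => absurd h not_false
  | a :: s, b :: t, h, hl, v => by
    rcases h with h | ⟨rfl, h⟩
    · exact Or.inl h
    · exact Or.inr ⟨rfl, lexLe_append_right h (by simpa using hl) v⟩

-- the removal primitive
def R : List Int → List Int
  | [] => []
  | [_] => []
  | x :: y :: t => if x < y then y :: t else x :: R (y :: t)

def Rpow : Nat → List Int → List Int
  | 0, u => u
  | m+1, u => Rpow m (R u)

theorem R_sublist : ∀ u : List Int, (R u).Sublist u
  | [] => List.Sublist.refl _
  | [_] => by simp [R]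
  | x :: y :: t => by
    simp only [R]
    split
    · exact (List.Sublist.refl _).cons _
    · exact (R_sublist (y :: t)).cons₂ _

theorem length_R : ∀ {u : List Int}, u ≠ [] → (R u).length + 1 = u.length
  | [], h => absurd rfl h
  | [_], _ => by simp [R]
  | x :: y :: t, _ => by
    simp only [R]
    split
    · simp
    · have := length_R (u := y :: t) (by simp)
      simp_all

theorem lexLe_tail : ∀ (y : Int) (t : List Int), lexLe t (R (y :: t))
  | _, [] => trivial
  | y, h :: t' => by
    simp only [R]
    split
    · exact lexLe_refl _
    · rcases lt_or_eq_of_le (le_of_not_gt (by assumption)) with hlt | heq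
      · exact Or.inl hlt
      · exact heq ▸ Or.inr ⟨rfl, lexLe_tail h t'⟩

theorem Rpow_sublist : ∀ (m : Nat) (u : List Int), (Rpow m u).Sublist u
  | 0, _ => List.Sublist.refl _
  | m+1, u => ((Rpow_sublist m (R u)).trans (R_sublist u))

theorem length_Rpow : ∀ (m : Nat) {u : List Int}, m ≤ u.length → (Rpow m u).length + m = u.length
  | 0, _, _ => by simp [Rpow]
  | m+1, u, h => by
    have hu : u ≠ [] := by rintro rfl; simp at h
    have h1 := length_R hu
    have h2 := length_Rpow m (u := R u) (by omega)
    simp only [Rpow]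
    omega

theorem Rpow_add (a b : Nat) (u : List Int) : Rpow (a + b) u = Rpow b (Rpow a u) := by
  induction a generalizing u with
  | zero => simp [Rpow]
  | succ a ih =>
    have : a + 1 + b = (a + b) + 1 := by omega
    rw [this]
    simpa [Rpow] using ih (R u)

/-- Exchange: every sublist of `u` missing at least one element is dominated by an
    equally long sublist of `R u`. -/
theorem exch : ∀ (u s : List Int), s.Sublist u → s.length + 1 ≤ u.length →
    ∃ s', s'.Sublist (R u) ∧ s'.length = s.length ∧ lexLe s s'
  | [], s, _, h => by simp at h
  | [_], s, hs, h => by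
    have hs0 : s = [] := by
      have h1 : s.length + 1 ≤ 1 := by simpa using h
      exact List.eq_nil_of_length_eq_zero (by omega)
    subst hs0
    exact ⟨[], by simp [R], rfl, trivial⟩
  | x :: y :: t, s, hs, h => by
    rcases List.sublist_cons_iff.mp hs with hs | ⟨s2, rfl, hs2⟩
    · -- s is a sublist of y :: t
      by_cases hlen : s.length = t.length + 1
      · -- s = y :: t entirely
        have hseq : s = y :: t := hs.eq_of_length (by simpa using hlen)
        subst hseq
        simp only [R]
        split
        · exact ⟨y :: t, List.Sublist.refl _, rfl, lexLe_refl _⟩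
        · refine ⟨x :: R (y :: t), List.Sublist.refl _, ?_, ?_⟩
          · have h1 := length_R (u := y :: t) (by simp)
            simp only [List.length_cons] at h1 ⊢
            omega
          · rcases lt_or_eq_of_le (le_of_not_gt (by assumption)) with hlt | heq
            · exact Or.inl hlt
            · exact heq ▸ Or.inr ⟨rfl, lexLe_tail y t⟩
      · have hlt : s.length + 1 ≤ t.length + 1 := by
          have := hs.length_le; simp at this; omega
        obtain ⟨s', h1, h2, h3⟩ := exch (y :: t) s hs hlt
        simp only [R]
        split
        · exact ⟨s, hs, rfl, lexLe_refl _⟩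
        · exact ⟨s', h1.cons _, h2, h3⟩
    · -- s = x :: s2 with s2 <+ y :: t
      have hs2len : s2.length + 1 ≤ t.length + 1 := by simp at h; omega
      simp only [R]
      split
      · -- x < y : dominate by y :: take |s2| t
        refine ⟨y :: List.take s2.length t, (List.take_sublist _ _).cons₂ _, ?_, ?_⟩
        · have : s2.length ≤ t.length := by omega
          simp [this]
        · exact Or.inl (by assumption)
      · obtain ⟨s2', h1, h2, h3⟩ := exch (y :: t) s2 hs2 hs2len
        exact ⟨x :: s2', h1.cons₂ _, by simp [h2], lexLe_cons x h3⟩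

/-- Main: `Rpow m u` dominates every sublist of `u` of its length. -/
theorem lexLe_Rpow : ∀ (m : Nat) (u s : List Int), s.Sublist u → s.length + m = u.length →
    lexLe s (Rpow m u)
  | 0, u, s, hs, hl => by
    have : s = u := hs.eq_of_length (by omega)
    subst this; exact lexLe_refl _
  | m+1, u, s, hs, hl => by
    obtain ⟨s', h1, h2, h3⟩ := exch u s hs (by omega)
    have hu : u ≠ [] := by rintro rfl; simp at hl
    have hRlen := length_R hu
    have : lexLe s' (Rpow m (R u)) := lexLe_Rpow m (R u) s' h1 (by omega)
    exact lexLe_trans h3 this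

-- non-increasing lists: R is dropLast, Rpow is take
theorem R_dropLast : ∀ {u : List Int}, u.Pairwise (fun a b => b ≤ a) → R u = u.dropLast
  | [], _ => rfl
  | [_], _ => rfl
  | x :: y :: t, h => by
    have hxy : y ≤ x := (List.pairwise_cons.mp h).1 y (by simp)
    have ht := (List.pairwise_cons.mp h).2
    simp only [R, if_neg (not_lt.mpr hxy)]
    rw [R_dropLast ht]
    simp

theorem R_append_last : ∀ {st : List Int} {l x : Int} (q : List Int),
    st.Pairwise (fun a b => b ≤ a) → st.getLast? = some l → l < x →
    R (st ++ x :: q) = st.dropLast ++ x :: q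
  | [], _, _, _, _, hl, _ => by simp at hl
  | [a], l, x, q, _, hl, hlt => by
    simp at hl; subst hl
    simp [R, if_pos hlt]
  | a :: b :: st', l, x, q, hp, hl, hlt => by
    have hab : b ≤ a := (List.pairwise_cons.mp hp).1 b (by simp)
    have ht := (List.pairwise_cons.mp hp).2
    have hl' : (b :: st').getLast? = some l := by
      rw [← hl]; simp [List.getLast?_cons_cons]
    have ih := R_append_last (st := b :: st') (l := l) (x := x) q ht hl' hlt
    simp only [List.cons_append] at ih ⊢
    simp only [R, if_neg (not_lt.mpr hab)]
    rw [ih]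
    simp

theorem pairwise_ge_last : ∀ {st : List Int} {l : Int},
    st.Pairwise (fun a b => b ≤ a) → st.getLast? = some l → ∀ a ∈ st, l ≤ a
  | [], _, _, hl => by simp at hl
  | [a], l, _, hl => by simp at hl; subst hl; simp
  | a :: b :: st', l, hp, hl => by
    have hab : b ≤ a := (List.pairwise_cons.mp hp).1 b (by simp)
    have ht := (List.pairwise_cons.mp hp).2
    have hl' : (b :: st').getLast? = some l := by rw [← hl]; simp [List.getLast?_cons_cons]
    have ih := pairwise_ge_last ht hl'
    intro c hc
    rcases List.mem_cons.mp hc with rfl | hc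
    · exact le_trans (ih b (by simp)) hab
    · exact ih c hc

theorem Rpow_take : ∀ (d : Nat) {u : List Int}, u.Pairwise (fun a b => b ≤ a) →
    d ≤ u.length → Rpow d u = u.take (u.length - d)
  | 0, u, _, _ => by simp [Rpow]
  | d+1, u, hp, hd => by
    have hu : u ≠ [] := by rintro rfl; simp at hd
    have : R u = u.dropLast := R_dropLast hp
    have hp' : u.dropLast.Pairwise (fun a b : Int => b ≤ a) := hp.sublist (List.dropLast_sublist u)
    have hlen : u.dropLast.length = u.length - 1 := by simp
    simp only [Rpow, this]
    rw [Rpow_take d hp' (by omega)]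
    rw [hlen, List.dropLast_eq_take, List.take_take]
    congr 1
    omega

-- ========== A-side: the window fold ==========
def AStep (a : List Int) (x : Int) : List Int := R (a ++ [x])
def AFold (a : List Int) (ys : List Int) : List Int := ys.foldl AStep a

theorem length_AStep (a : List Int) (x : Int) : (AStep a x).length = a.length := by
  have := length_R (u := a ++ [x]) (by simp)
  simp only [AStep]
  simp at this
  omega

def AChain (p a : List Int) : Prop :=
  ∀ (j : Nat) (s : List Int), s.Sublist p → s.length + j = a.length → lexLe s (Rpow j a)

theorem achain_base (a : List Int) : AChain a a := fun j s hs hl => lexLe_Rpow j a s hs hl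

theorem achain_step {p a : List Int} (x : Int) (h : AChain p a) :
    AChain (p ++ [x]) (AStep a x) := by
  intro j s hs hl
  rw [length_AStep] at hl
  have hRj : Rpow j (AStep a x) = Rpow (j + 1) (a ++ [x]) := by
    have : j + 1 = 1 + j := by omega
    rw [this, Rpow_add]
    rfl
  rw [hRj]
  rcases List.sublist_append_iff.mp hs with ⟨s1, s2, rfl, hs1, hs2⟩
  rcases List.sublist_singleton.mp hs2 with rfl | rfl
  · -- s entirely inside p
    rw [List.append_nil] at hl ⊢
    have hja : j ≤ a.length := by omega
    have h1 : lexLe s1 (Rpow j a) := h j s1 hs1 hl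
    have hlenRj : (Rpow j a).length + j = a.length := length_Rpow j hja
    have h2 : lexLe (Rpow j a) (Rpow (j + 1) (a ++ [x])) := by
      apply lexLe_Rpow
      · exact (Rpow_sublist j a).trans (List.sublist_append_left a [x])
      · simp; omega
    exact lexLe_trans h1 h2
  · -- s = s1 ++ [x]
    have hj1 : j + 1 ≤ a.length := by simp at hl; omega
    have h1 : lexLe s1 (Rpow (j+1) a) := h (j+1) s1 hs1 (by simp at hl; omega)
    have hlenR : (Rpow (j+1) a).length + (j+1) = a.length := length_Rpow (j+1) hj1
    have h2 : lexLe (s1 ++ [x]) (Rpow (j+1) a ++ [x]) :=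
      lexLe_append_right h1 (by simp at hl; omega) [x]
    have h3 : lexLe (Rpow (j+1) a ++ [x]) (Rpow (j+1) (a ++ [x])) := by
      apply lexLe_Rpow
      · exact (Rpow_sublist (j+1) a).append_right [x]
      · simp; omega
    exact lexLe_trans h2 h3

theorem afold_inv : ∀ (ys p a : List Int), a.Sublist p → AChain p a →
    (AFold a ys).Sublist (p ++ ys) ∧ AChain (p ++ ys) (AFold a ys)
  | [], p, a, hsub, hch => by simpa [AFold] using ⟨hsub, hch⟩
  | y :: ys, p, a, hsub, hch => by
    have hstep := achain_step y hch
    have hsub' : (AStep a y).Sublist (p ++ [y]) :=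
      ((R_sublist (a ++ [y])).trans (hsub.append_right [y]))
    have ih := afold_inv ys (p ++ [y]) (AStep a y) hsub' hstep
    have : p ++ [y] ++ ys = p ++ y :: ys := by simp
    rw [this] at ih
    exact ih

theorem length_AFold : ∀ (ys a : List Int), (AFold a ys).length = a.length
  | [], _ => rfl
  | y :: ys, a => by
    have := length_AFold ys (AStep a y)
    simpa [AFold, length_AStep] using this

-- ========== bridges from the ports ==========

theorem popAt_eq_eraseIdx {a : List Int} {j : Int} (h0 : 0 ≤ j) (h1 : j.toNat < a.length) :
    popAt a j = a.eraseIdx j.toNat := by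
  have : j = (j.toNat : Int) := by omega
  rw [popAt, this, PySem.List.pop?_natCast a j.toNat h1]
  rfl

theorem pyGetD_cons_pos {x : Int} {v : List Int} {j : Int} (h : 0 ≤ j) :
    PySem.List.pyGetD (x :: v) (j + 1) 0 = PySem.List.pyGetD v j 0 := by
  have hj : j = (j.toNat : Int) := by omega
  rw [PySem.List.pyGetD, PySem.List.pyGetD, hj, PySem.List.pyGet?_cons_succ]

theorem findJGo_bounds : ∀ (fuel : Nat) (a : List Int) (kI j : Int), 0 ≤ j → j ≤ kI →
    j ≤ findJGo fuel a kI j ∧ findJGo fuel a kI j ≤ kI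
  | 0, _, _, _, h0, h1 => by simp [findJGo]; omega
  | fuel+1, a, kI, j, h0, h1 => by
    simp only [findJGo]
    split
    · split
      · omega
      · have := findJGo_bounds fuel a kI (j+1) (by omega) (by omega)
        omega
    · omega

theorem findJ_shift : ∀ (fuel : Nat) (v : List Int) (x : Int) (kI j : Int), 0 ≤ j →
    findJGo fuel (x :: v) (kI + 1) (j + 1) = findJGo fuel v kI j + 1
  | 0, _, _, _, _, _ => rfl
  | fuel+1, v, x, kI, j, h0 => by
    by_cases hjk : j < kI
    · simp only [findJGo]
      rw [if_pos (by omega : j + 1 < kI + 1), if_pos hjk]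
      rw [pyGetD_cons_pos (by omega : (0:Int) ≤ j), pyGetD_cons_pos (by omega : (0:Int) ≤ j + 1)]
      split
      · rfl
      · exact findJ_shift fuel v x kI (j+1) (by omega)
    · simp only [findJGo]
      rw [if_neg (by omega : ¬ j + 1 < kI + 1), if_neg hjk]

theorem findr : ∀ (kn : Nat) (u : List Int) (fuel : Nat), u.length = kn + 1 → kn + 1 ≤ fuel →
    popAt u (findJGo fuel u (kn : Int) 0) = R u
  | 0, u, fuel, hlen, hfuel => by
    obtain ⟨x, hx⟩ : ∃ x, u = [x] := by
      cases u with
      | nil => simp at hlen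
      | cons a t => cases t with
        | nil => exact ⟨a, rfl⟩
        | cons b t' => simp at hlen
    subst hx
    obtain ⟨f, rfl⟩ : ∃ f, fuel = f + 1 := ⟨fuel - 1, by omega⟩
    simp only [findJGo]
    rw [if_neg (by omega)]
    rw [popAt_eq_eraseIdx (by omega) (by simp)]
    simp [R]
  | kn+1, u, fuel, hlen, hfuel => by
    obtain ⟨x, y, t, hx⟩ : ∃ x y t, u = x :: y :: t := by
      cases u with
      | nil => simp at hlen
      | cons a w => cases w with
        | nil => simp at hlen
        | cons b t' => exact ⟨a, b, t', rfl⟩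
    subst hx
    obtain ⟨f, rfl⟩ : ∃ f, fuel = f + 1 := ⟨fuel - 1, by omega⟩
    simp only [findJGo]
    rw [if_pos (by exact_mod_cast Nat.succ_pos kn)]
    have hg0 : PySem.List.pyGetD (x :: y :: t) 0 0 = x := PySem.List.pyGetD_zero_cons _ _ _
    have hg1 : PySem.List.pyGetD (x :: y :: t) (0 + 1) 0 = y := by
      rw [pyGetD_cons_pos (by omega : (0:Int) ≤ 0)]
      exact PySem.List.pyGetD_zero_cons _ _ _
    rw [hg0, hg1]
    by_cases hxy : x < y
    · rw [if_pos hxy]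
      rw [popAt_eq_eraseIdx (by omega) (by simp)]
      simp [R, if_pos hxy]
    · rw [if_neg hxy]
      have hcast : ((kn + 1 : Nat) : Int) = (kn : Int) + 1 := by push_cast; ring
      have hshift : findJGo f (x :: y :: t) ((kn : Int) + 1) (0 + 1) =
          findJGo f (y :: t) (kn : Int) 0 + 1 := findJ_shift f (y :: t) x (kn : Int) 0 le_rfl
      rw [hcast, hshift]
      have hb := findJGo_bounds f (y :: t) (kn : Int) 0 le_rfl (by exact_mod_cast Nat.zero_le kn)
      set m := findJGo f (y :: t) (kn : Int) 0 with hm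
      have hmlt : m.toNat < (y :: t).length := by
        simp at hlen ⊢; omega
      have hcons : popAt (x :: y :: t) (m + 1) = x :: popAt (y :: t) m := by
        rw [popAt_eq_eraseIdx (by omega) (by simp at hlen ⊢; omega),
            popAt_eq_eraseIdx (by omega) hmlt]
        have : (m + 1).toNat = m.toNat + 1 := by omega
        rw [this, List.eraseIdx_cons_succ]
      rw [hcons, findr kn (y :: t) f (by simp at hlen ⊢; omega) (by omega)]
      simp only [R, if_neg hxy]

-- initial buffer: [nums[i] for i in range(k)] = nums.take k.toNat
theorem range_map_getD : ∀ (kn : Nat) (nums : List Int), kn ≤ nums.length →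
    (List.range kn).map (fun i => nums.getD i 0) = nums.take kn := by
  intro kn
  induction kn with
  | zero => simp
  | succ n ih =>
    intro nums h
    have hn : n < nums.length := by omega
    rw [List.range_succ, List.map_append, ih nums (by omega), List.map_cons, List.map_nil,
        List.take_add_one, List.getElem?_eq_getElem hn, List.getD_eq_getElem nums 0 hn]
    rfl

theorem init_take {nums : List Int} {k : Int} (h0 : 0 ≤ k) (h1 : k ≤ (nums.length : Int)) :
    (PySem.List.pyRange 0 k).map (fun i => PySem.List.pyGetD nums i 0) = nums.take k.toNat := by
  rw [PySem.List.pyRange_one]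
  rw [List.map_map]
  have : ((fun i => PySem.List.pyGetD nums i 0) ∘ fun n : Nat => (0 : Int) + ↑n) =
      fun n : Nat => nums.getD n 0 := by
    funext n
    simp [PySem.List.pyGetD_natCast]
  rw [this]
  have hk : (k - 0).toNat = k.toNat := by omega
  rw [hk, range_map_getD k.toNat nums (by omega)]

-- ========== B-side: the stack fold ==========

theorem popTop_eq_dropLast {st : List Int} (h : st ≠ []) :
    ((PySem.List.pop? st (-1)).map (·.2)).getD st = st.dropLast := by
  conv_lhs => rw [← List.dropLast_append_getLast h]
  rw [PySem.List.pop?_last]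
  rfl

/-- Everything `popLoopGo` guarantees, in one induction. -/
theorem popLoopGo_spec : ∀ (fuel : Nat) (st : List Int) (drop x : Int),
    st.length < fuel → 0 ≤ drop → (0 < drop → st.Pairwise (fun a b => b ≤ a)) →
    0 ≤ (popLoopGo fuel st drop x).2 ∧
    (popLoopGo fuel st drop x).2 ≤ drop ∧
    (popLoopGo fuel st drop x).1.length + (drop - (popLoopGo fuel st drop x).2).toNat = st.length ∧
    (∀ q, Rpow (drop - (popLoopGo fuel st drop x).2).toNat (st ++ x :: q) =
      (popLoopGo fuel st drop x).1 ++ x :: q) ∧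
    (0 < (popLoopGo fuel st drop x).2 → ((popLoopGo fuel st drop x).1 ++ [x]).Pairwise (fun a b => b ≤ a))
  | 0, st, drop, x, hfuel, _, _ => by omega
  | fuel+1, st, drop, x, hfuel, hd0, hpw => by
    simp only [popLoopGo]
    split
    · rename_i hcond
      obtain ⟨hne, hdpos, hlt⟩ := hcond
      have hpw' := hpw hdpos
      rw [popTop_eq_dropLast hne] at *
      have hlast : st.getLast? = some (st.getLast hne) := List.getLast?_eq_some_getLast hne
      have hlastlt : st.getLast hne < x := by
        rwa [PySem.List.pyGetD_neg_one st 0 hne] at hlt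
      have hlen : st.dropLast.length = st.length - 1 := by simp
      have hlen0 : 0 < st.length := List.length_pos_of_ne_nil hne
      have ih := popLoopGo_spec fuel st.dropLast (drop - 1) x (by omega) (by omega)
        (fun _ => hpw'.sublist (List.dropLast_sublist st))
      obtain ⟨i1, i2, i3, i4, i5⟩ := ih
      refine ⟨i1, by omega, by omega, ?_, i5⟩
      intro q
      have hR : R (st ++ x :: q) = st.dropLast ++ x :: q :=
        R_append_last q hpw' hlast hlastlt
      have hm : (drop - (popLoopGo fuel st.dropLast (drop - 1) x).2).toNat =
          ((drop - 1) - (popLoopGo fuel st.dropLast (drop - 1) x).2).toNat + 1 := by omega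
      rw [hm]
      have hstep : ∀ (n : Nat) (u : List Int), Rpow (n + 1) u = Rpow n (R u) := fun n u => rfl
      rw [show ((drop - 1) - (popLoopGo fuel st.dropLast (drop-1) x).2).toNat + 1
            = (((drop - 1) - (popLoopGo fuel st.dropLast (drop-1) x).2).toNat) + 1 from rfl]
      rw [hstep, hR]
      exact i4 q
    · rename_i hcond
      refine ⟨hd0, le_refl _, by simp, fun q => by simp [Rpow], ?_⟩
      intro hdpos
      have hpw' := hpw hdpos
      push_neg at hcond
      rcases eq_or_ne st [] with rfl | hne
      · simp
      · have hgex : x ≤ PySem.List.pyGetD st (-1) 0 := hcond hne hdpos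
        rw [PySem.List.pyGetD_neg_one st 0 hne] at hgex
        have hlast : st.getLast? = some (st.getLast hne) := List.getLast?_eq_some_getLast hne
        rw [List.pairwise_append]
        refine ⟨hpw', by simp, ?_⟩
        intro a ha b hb
        simp at hb; subst hb
        exact le_trans hgex (pairwise_ge_last hpw' hlast a ha)

/-- The stack fold invariant, threaded through the whole list. -/
theorem bfold_inv (budget : Int) : ∀ (xs p st : List Int) (drop : Int) (used : Nat),
    (∀ q, Rpow used (p ++ q) = st ++ q) → 0 ≤ drop →
    (0 < drop → st.Pairwise (fun a b => b ≤ a)) →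
    (used : Int) + drop = budget → used + st.length = p.length →
    ∃ used' : Nat,
      (∀ q, Rpow used' ((p ++ xs) ++ q) =
        (xs.foldl (fun (pr : List Int × Int) x =>
          ((popLoopGo (pr.1.length + 1) pr.1 pr.2 x).1 ++ [x],
           (popLoopGo (pr.1.length + 1) pr.1 pr.2 x).2)) (st, drop)).1 ++ q) ∧
      0 ≤ (xs.foldl (fun (pr : List Int × Int) x =>
          ((popLoopGo (pr.1.length + 1) pr.1 pr.2 x).1 ++ [x],
           (popLoopGo (pr.1.length + 1) pr.1 pr.2 x).2)) (st, drop)).2 ∧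
      (0 < (xs.foldl (fun (pr : List Int × Int) x =>
          ((popLoopGo (pr.1.length + 1) pr.1 pr.2 x).1 ++ [x],
           (popLoopGo (pr.1.length + 1) pr.1 pr.2 x).2)) (st, drop)).2 →
        (xs.foldl (fun (pr : List Int × Int) x =>
          ((popLoopGo (pr.1.length + 1) pr.1 pr.2 x).1 ++ [x],
           (popLoopGo (pr.1.length + 1) pr.1 pr.2 x).2)) (st, drop)).1.Pairwise (fun a b => b ≤ a)) ∧
      (used' : Int) + (xs.foldl (fun (pr : List Int × Int) x =>
          ((popLoopGo (pr.1.length + 1) pr.1 pr.2 x).1 ++ [x],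
           (popLoopGo (pr.1.length + 1) pr.1 pr.2 x).2)) (st, drop)).2 = budget ∧
      used' + (xs.foldl (fun (pr : List Int × Int) x =>
          ((popLoopGo (pr.1.length + 1) pr.1 pr.2 x).1 ++ [x],
           (popLoopGo (pr.1.length + 1) pr.1 pr.2 x).2)) (st, drop)).1.length = (p ++ xs).length
  | [], p, st, drop, used, h1, h2, h3, h4, h5 => by
    exact ⟨used, by simpa using h1, h2, fun h => h3 h, h4, by simpa using h5⟩
  | x :: xs, p, st, drop, used, h1, h2, h3, h4, h5 => by
    obtain ⟨i1, i2, i3, i4, i5⟩ := popLoopGo_spec (st.length + 1) st drop x (by omega) h2 h3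
    set r := popLoopGo (st.length + 1) st drop x with hr
    set m := (drop - r.2).toNat with hmdef
    have hnew1 : ∀ q, Rpow (used + m) ((p ++ [x]) ++ q) = (r.1 ++ [x]) ++ q := by
      intro q
      have : (p ++ [x]) ++ q = p ++ (x :: q) := by simp
      rw [this, Rpow_add, h1 (x :: q), i4 q]
      simp
    have hstep := bfold_inv budget xs (p ++ [x]) (r.1 ++ [x]) r.2 (used + m)
      hnew1 i1
      (fun h => i5 h)
      (by push_cast; omega)
      (by simp at h5 ⊢; omega)
    obtain ⟨used', j1, j2, j3, j4, j5⟩ := hstep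
    refine ⟨used', ?_, ?_, ?_, ?_, ?_⟩
    · intro q
      have hpp : p ++ x :: xs = (p ++ [x]) ++ xs := by simp
      rw [List.foldl_cons, hpp]
      exact (by simpa using j1 q)
    · simpa using j2
    · simpa using j3
    · simpa using j4
    · have : p ++ x :: xs = (p ++ [x]) ++ xs := by simp
      rw [this]
      simpa using j5

-- the two characterizations
theorem A_char {nums : List Int} {k : Int} (h0 : 0 < k) (h1 : k ≤ (nums.length : Int)) :
    getMaxK nums k = AFold (nums.take k.toNat) (nums.drop k.toNat) := by
  unfold getMaxK
  rw [if_neg (by omega)]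
  simp only [PySem.List.len_eq]
  rw [init_take (by omega) h1]
  rw [PySem.List.foldl_pyRange_pyGetD' nums 0
    (fun a v => popAt (a ++ [v]) (findJGo (k.toNat + 1) (a ++ [v]) k 0))
    (nums.take k.toNat) (by omega)]
  have hlen : (nums.take k.toNat).length = k.toNat := by
    simp; omega
  generalize hds : nums.drop k.toNat = ds
  generalize ha : nums.take k.toNat = a
  rw [ha] at hlen
  clear hds ha
  induction ds generalizing a with
  | nil => rfl
  | cons d ds ih =>
    simp only [List.foldl_cons]
    have hstep : popAt (a ++ [d]) (findJGo (k.toNat + 1) (a ++ [d]) k 0) = AStep a d := by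
      have hk : k = ((k.toNat : Nat) : Int) := by omega
      rw [AStep, hk]
      exact findr k.toNat (a ++ [d]) (k.toNat + 1) (by simp [hlen]) (by omega)
    rw [hstep]
    exact ih (AStep a d) (by rw [length_AStep, hlen])

theorem B_char {nums : List Int} {k : Int} (h0 : 0 < k) (h1 : k ≤ (nums.length : Int)) :
    getMaxK_alt nums k = Rpow (nums.length - k.toNat) nums := by
  unfold getMaxK_alt
  rw [if_neg (by omega)]
  simp only [PySem.List.len_eq]
  have hbase := bfold_inv ((nums.length : Int) - k) nums [] [] ((nums.length : Int) - k) 0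
    (fun q => by simp [Rpow]) (by omega) (fun _ => List.Pairwise.nil) (by simp) (by simp)
  obtain ⟨used', j1, j2, j3, j4, j5⟩ := hbase
  simp only [List.nil_append] at j1 j4 j5
  set F := nums.foldl (fun (pr : List Int × Int) x =>
      ((popLoopGo (pr.1.length + 1) pr.1 pr.2 x).1 ++ [x],
       (popLoopGo (pr.1.length + 1) pr.1 pr.2 x).2)) ([], (nums.length : Int) - k) with hF
  have hst : F.1 = Rpow used' nums := by
    have := j1 []
    simpa using this.symm
  rw [PySem.List.slice_to _ (by omega)]
  rcases eq_or_lt_of_le j2 with hdz | hdpos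
  · -- drop ended at 0: the stack has exactly k elements
    have husd : (used' : Int) = (nums.length : Int) - k := by omega
    have hlenF : F.1.length = k.toNat := by omega
    rw [List.take_of_length_le (by omega), hst]
    congr 1
    omega
  · -- budget left: stack is non-increasing, take k = iterate dropLast
    have hpw := j3 hdpos
    have h5' : used' + F.1.length = nums.length := j5
    have h4' : (used' : Int) + F.2 = (nums.length : Int) - k := j4
    have hlenR : (Rpow used' nums).length = F.1.length := by rw [hst]
    rw [hst] at hpw
    rw [hst]
    have hd : F.2.toNat ≤ (Rpow used' nums).length := by omega
    have hk : k.toNat = (Rpow used' nums).length - F.2.toNat := by omega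
    rw [hk, ← Rpow_take F.2.toNat hpw hd, ← Rpow_add]
    congr 1
    omega

-- A on negative k: the buffer stays empty, the loop keeps popping the single appended digit
theorem A_neg {nums : List Int} {k : Int} (hk : k < 0) : getMaxK nums k = [] := by
  unfold getMaxK
  rw [if_neg (by omega)]
  rw [PySem.List.pyRange_one_eq_nil (by omega : k ≤ 0)]
  simp only [List.map_nil]
  generalize PySem.List.pyRange k (PySem.List.len nums) = l
  induction l with
  | nil => rfl
  | cons i l ih =>
    simp only [List.foldl_cons]
    have hkt : k.toNat = 0 := by omega
    have hbody : popAt ([] ++ [PySem.List.pyGetD nums i 0])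
        (findJGo (k.toNat + 1) ([] ++ [PySem.List.pyGetD nums i 0]) k 0) = [] := by
      rw [hkt]
      simp only [List.nil_append, findJGo]
      rw [if_neg (by omega)]
      rw [popAt_eq_eraseIdx (by omega) (by simp)]
      rfl
    rw [hbody]
    exact ih

-- ===== VERDICT (by name: the statement is the Claim_ definition above) =====
theorem getMaxK_spec : Claim_equal_getMaxK := by
  intro nums k _ hpre
  obtain ⟨hp1, hp2⟩ := hpre
  rw [PySem.List.len_eq] at hp1 hp2
  unfold Spec_getMaxK
  rcases lt_trichotomy k 0 with hk | hk | hk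
  · -- k < 0 : A returns [] through the empty buffer, B through its k ≤ 0 guard
    rw [A_neg hk]
    unfold getMaxK_alt
    rw [if_pos (by omega)]
  · -- k = 0
    subst hk
    unfold getMaxK getMaxK_alt
    simp
  · -- 0 < k ≤ len
    rw [A_char hk hp2, B_char hk hp2]
    -- both sides are the lexicographically greatest length-k sublist of nums
    set kn := k.toNat with hkn
    have hknle : kn ≤ nums.length := by omega
    have hbase := afold_inv (nums.drop kn) (nums.take kn) (nums.take kn)
      (List.Sublist.refl _) (achain_base _)
    rw [List.take_append_drop] at hbase
    obtain ⟨hsubA, hchA⟩ := hbase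
    have hlenA : (AFold (nums.take kn) (nums.drop kn)).length = kn := by
      rw [length_AFold]; simp; omega
    have hlenT : (Rpow (nums.length - kn) nums).length + (nums.length - kn) = nums.length :=
      length_Rpow _ (by omega)
    apply lexLe_antisymm
    · -- A ≤ B : B is Rpow, which dominates all k-sublists
      apply lexLe_Rpow _ nums _ hsubA
      omega
    · -- B ≤ A : A's chain at level 0
      have := hchA 0 (Rpow (nums.length - kn) nums) (Rpow_sublist _ nums) (by omega)
      simpa [Rpow] using this
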